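-- pv_equiv track=rewrite | github.com/EmiDobre/Formal-Langauges-and-Automata | src/Regex.py | syntactic_sugar
-- ===== SOURCE A (Python) =====
-- def syntactic_sugar(index, tokenIndex, tokens, regex ):
--
--     start = regex[index + 1]
--     end = regex[index + 3]
--     token = ('PARANTEZA(', '(')
--     tokens[tokenIndex] = token
--     tokenIndex += 1
--     #cifre
--     if start.isdigit() and end.isdigit():
--         nr = int(start)
--         while nr <= int(end):
--             token = ('SYMBOL', str(nr))
--             tokens[tokenIndex] = token
--             tokenIndex += 1
--             if nr != int(end):
--                 token = ('UNION', '|')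
--                 tokens[tokenIndex] = token
--                 tokenIndex += 1
--             nr += 1
--     #litere:
--     if start.isalpha() and end.isalpha():
--         current_char = start
--         while current_char <= end:
--             token = ('SYMBOL', current_char)
--             tokens[tokenIndex] = token
--             tokenIndex += 1
--             if current_char != end:
--                 token = ('UNION', '|')
--                 tokens[tokenIndex] = token
--                 tokenIndex += 1
--             current_char = chr(ord(current_char) + 1)
--
--     #end:
--     token = ('PARANTEZA)', ')')
--     tokens[tokenIndex] = token
--     tokenIndex += 1
--
--     return tokenIndex, tokens
-- ===== SOURCE B (Python) =====
-- def syntactic_sugar(index, tokenIndex, tokens, regex):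
--     start = regex[index + 1]
--     end = regex[index + 3]
--     if start.isdigit() and end.isdigit():
--         symbols = [str(n) for n in range(int(start), int(end) + 1)]
--     elif start.isalpha() and end.isalpha():
--         symbols = [chr(c) for c in range(ord(start), ord(end) + 1)]
--     else:
--         symbols = []
--     entries = [('PARANTEZA(', '(')]
--     for s in symbols:
--         entries.append(('SYMBOL', s))
--         entries.append(('UNION', '|'))
--     if symbols:
--         entries.pop()
--     entries.append(('PARANTEZA)', ')'))
--     for t in entries:
--         tokens[tokenIndex] = t
--         tokenIndex += 1
--     return tokenIndex, tokens
-- ===== Notes on version B (the rewrite author's own statement) =====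
-- stated objective: simpler
-- what changed: B replaces A's two interleaved while-loops (which emit SYMBOL/UNION tokens in-place with look-ahead tests each iteration) by a three-stage pipeline: precompute the symbol list with a range comprehension, build a flat entry list (dropping the trailing UNION with one pop), and write all entries to the dict in a single uniform loop.
import Mathlib
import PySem

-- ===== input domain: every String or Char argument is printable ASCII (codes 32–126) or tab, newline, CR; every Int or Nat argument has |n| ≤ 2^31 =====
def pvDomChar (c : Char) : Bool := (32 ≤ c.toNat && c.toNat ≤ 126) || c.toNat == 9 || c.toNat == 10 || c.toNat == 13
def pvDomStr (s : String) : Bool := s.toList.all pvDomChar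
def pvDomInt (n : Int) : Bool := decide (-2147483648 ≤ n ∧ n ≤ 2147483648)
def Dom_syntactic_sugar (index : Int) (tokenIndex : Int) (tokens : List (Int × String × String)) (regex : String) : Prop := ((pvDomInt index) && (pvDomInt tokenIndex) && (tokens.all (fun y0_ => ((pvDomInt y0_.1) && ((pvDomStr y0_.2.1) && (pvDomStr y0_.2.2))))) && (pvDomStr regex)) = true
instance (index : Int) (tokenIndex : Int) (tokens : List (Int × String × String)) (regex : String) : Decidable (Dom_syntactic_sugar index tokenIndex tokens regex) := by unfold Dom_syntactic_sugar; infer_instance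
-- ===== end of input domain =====

-- B rebuilds A's token-range expansion as precompute-symbols / build-entry-list / one write loop (objective: simpler);
-- both Pythons mutate the `tokens` dict in place identically — the equivalence proved is about the returned value.


-- ===== PORT A =====
-- A's digit while-loop: `while nr <= int(end): … tokens[ti]=SYMBOL; if nr != int(end): tokens[ti]=UNION; nr += 1`
def digitLoopA (nr e ti : Int) (d : PySem.Dict Int (String × String)) :
    Int × PySem.Dict Int (String × String) :=
  if _h : nr ≤ e then
    let d := d.insert ti ("SYMBOL", PySem.Int.toStr nr)
    let ti := ti + 1
    let (ti, d) := if nr ≠ e then (ti + 1, d.insert ti ("UNION", "|")) else (ti, d)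
    digitLoopA (nr + 1) e ti d
  else (ti, d)
termination_by (e + 1 - nr).toNat
decreasing_by omega

-- A's letter while-loop, transliterated at the ord level (exact for the ASCII chars Dom admits:
-- `current_char <= end` / `!=` on one-char ASCII strings is comparison of the code points).
def alphaLoopA (cn : Nat) (e : Char) (ti : Int) (d : PySem.Dict Int (String × String)) :
    Int × PySem.Dict Int (String × String) :=
  if _h : cn ≤ e.toNat then
    let d := d.insert ti ("SYMBOL", String.mk [Char.ofNat cn])
    let ti := ti + 1
    let (ti, d) := if cn ≠ e.toNat then (ti + 1, d.insert ti ("UNION", "|")) else (ti, d)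
    alphaLoopA (cn + 1) e ti d
  else (ti, d)
termination_by e.toNat + 1 - cn
decreasing_by omega

def syntactic_sugar (index : Int) (tokenIndex : Int) (tokens : List (Int × String × String)) (regex : String) : Int × (List (Int × String × String)) :=
  match PySem.Str.pyGet? regex (index + 1), PySem.Str.pyGet? regex (index + 3) with
  | some start, some stop =>
    let d := (PySem.Dict.ofList tokens).insert tokenIndex ("PARANTEZA(", "(")
    let ti := tokenIndex + 1
    let r1 :=
      if PySem.Chars.isdigit start && PySem.Chars.isdigit stop then
        match PySem.Int.ofChars? [start], PySem.Int.ofChars? [stop] with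
        | some s, some e => digitLoopA s e ti d
        | _, _ => (ti, d)   -- unreachable: an ASCII digit always parses with int()
      else (ti, d)
    let r2 :=
      if PySem.Chars.isalpha start && PySem.Chars.isalpha stop then
        alphaLoopA start.toNat stop r1.1 r1.2
      else r1
    (r2.1 + 1, (r2.2.insert r2.1 ("PARANTEZA)", ")")).items)
  | _, _ => (0, [])       -- unreachable under Pre_ (Python raises IndexError)

-- ===== PORT B =====
def syntactic_sugar_alt (index : Int) (tokenIndex : Int) (tokens : List (Int × String × String)) (regex : String) : Int × (List (Int × String × String)) :=
  match PySem.Str.pyGet? regex (index + 1) with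
  | none => (0, [])
  | some start =>
    match PySem.Str.pyGet? regex (index + 3) with
    | none => (0, [])
    | some stop =>
    let symbols : List String :=
      if PySem.Chars.isdigit start && PySem.Chars.isdigit stop then
        match PySem.Int.ofChars? [start] with
        | none => []      -- unreachable: an ASCII digit always parses with int()
        | some s =>
          match PySem.Int.ofChars? [stop] with
          | none => []    -- unreachable likewise
          | some e => (PySem.List.pyRange s (e + 1) 1).map PySem.Int.toStr
      else if PySem.Chars.isalpha start && PySem.Chars.isalpha stop then
        (PySem.List.pyRange (start.toNat : Int) ((stop.toNat : Int) + 1) 1).map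
          (fun c => String.mk [Char.ofNat c.toNat])
      else []
    let entries := symbols.foldl (fun acc s => acc ++ [("SYMBOL", s), ("UNION", "|")])
                     ([("PARANTEZA(", "(")] : List (String × String))
    let entries := if symbols = [] then entries else entries.dropLast
    let entries := entries ++ [("PARANTEZA)", ")")]
    let r := entries.foldl
        (fun (p : Int × PySem.Dict Int (String × String)) t => (p.1 + 1, p.2.insert p.1 t))
        (tokenIndex, PySem.Dict.ofList tokens)
    (r.1, r.2.items)

-- ===== PRECONDITION & SPEC =====
-- Pre_ excludes exactly the inputs where Python's regex[index+1] / regex[index+3] raises IndexError.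
def Pre_syntactic_sugar (index : Int) (tokenIndex : Int) (tokens : List (Int × String × String)) (regex : String) : Prop :=
  PySem.Raise.InRange regex.toList.length (index + 1) ∧ PySem.Raise.InRange regex.toList.length (index + 3)
instance (index : Int) (tokenIndex : Int) (tokens : List (Int × String × String)) (regex : String) : Decidable (Pre_syntactic_sugar index tokenIndex tokens regex) := by unfold Pre_syntactic_sugar; infer_instance

def pvWitness_syntactic_sugar : Int × Int × (List (Int × String × String)) × String := (0, 0, [], "[a-c]")

def Spec_syntactic_sugar (index : Int) (tokenIndex : Int) (tokens : List (Int × String × String)) (regex : String) (out : Int × (List (Int × String × String))) : Prop := out = syntactic_sugar_alt index tokenIndex tokens regex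
instance (index : Int) (tokenIndex : Int) (tokens : List (Int × String × String)) (regex : String) (out : Int × (List (Int × String × String))) : Decidable (Spec_syntactic_sugar index tokenIndex tokens regex out) := by unfold Spec_syntactic_sugar; infer_instance

-- ===== CLAIM (what is proved, stated in full; the proofs are below) =====
def Claim_equal_syntactic_sugar : Prop := ∀ (index : Int) (tokenIndex : Int) (tokens : List (Int × String × String)) (regex : String), Dom_syntactic_sugar index tokenIndex tokens regex → Pre_syntactic_sugar index tokenIndex tokens regex → Spec_syntactic_sugar index tokenIndex tokens regex (syntactic_sugar index tokenIndex tokens regex)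

-- ===== LEMMAS AND PROOFS =====

-- the write loop of B, as a named function
def emitFold (l : List (String × String)) (ti : Int) (d : PySem.Dict Int (String × String)) :
    Int × PySem.Dict Int (String × String) :=
  l.foldl (fun p t => (p.1 + 1, p.2.insert p.1 t)) (ti, d)

-- SYMBOL/UNION interleaving of a symbol list
def interleave : List String → List (String × String)
  | [] => []
  | [s] => [("SYMBOL", s)]
  | s :: t :: r => ("SYMBOL", s) :: ("UNION", "|") :: interleave (t :: r)

theorem emitFold_nil (ti d) : emitFold [] ti d = (ti, d) := rfl

theorem emitFold_cons (t l ti d) :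
    emitFold (t :: l) ti d = emitFold l (ti + 1) (d.insert ti t) := rfl

theorem digitLoopA_eq (n : Nat) : ∀ (s e ti : Int) d, (e + 1 - s).toNat = n →
    digitLoopA s e ti d = emitFold (interleave ((PySem.List.pyRange s (e + 1) 1).map PySem.Int.toStr)) ti d := by
  induction n with
  | zero =>
    intro s e ti d hn
    rw [digitLoopA]
    have hse : ¬ s ≤ e := by omega
    have : PySem.List.pyRange s (e + 1) 1 = [] := PySem.List.pyRange_one_eq_nil (by omega)
    simp [hse, this, interleave, emitFold_nil]
  | succ n ih =>
    intro s e ti d hn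
    rw [digitLoopA]
    have hse : s ≤ e := by omega
    rw [PySem.List.pyRange_one_cons (by omega)]
    by_cases hne : s = e
    · subst hne
      have : PySem.List.pyRange (s + 1) (s + 1) 1 = [] := PySem.List.pyRange_one_eq_nil (by omega)
      simp [this, interleave, emitFold_cons, emitFold_nil, digitLoopA]
    · rw [PySem.List.pyRange_one_cons (by omega)]
      have ih' := ih (s + 1) e (ti + 1 + 1) (((d.insert ti ("SYMBOL", PySem.Int.toStr s)).insert (ti+1) ("UNION", "|"))) (by omega)
      rw [PySem.List.pyRange_one_cons (by omega)] at ih'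
      simp only [hse, hne, if_true, if_false, ne_eq, not_false_eq_true, ite_true, List.map]
      rw [interleave, emitFold_cons, emitFold_cons]
      simpa using ih'
  
theorem alphaLoopA_eq (n : Nat) : ∀ (cn : Nat) (e : Char) (ti : Int) d, e.toNat + 1 - cn = n →
    alphaLoopA cn e ti d = emitFold (interleave ((PySem.List.pyRange (cn : Int) ((e.toNat : Int) + 1) 1).map
      (fun c => String.mk [Char.ofNat c.toNat]))) ti d := by
  induction n with
  | zero =>
    intro cn e ti d hn
    rw [alphaLoopA]
    have hse : ¬ cn ≤ e.toNat := by omega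
    have : PySem.List.pyRange (cn : Int) ((e.toNat : Int) + 1) 1 = [] := PySem.List.pyRange_one_eq_nil (by push_cast; omega)
    simp [hse, this, interleave, emitFold_nil]
  | succ n ih =>
    intro cn e ti d hn
    rw [alphaLoopA]
    have hse : cn ≤ e.toNat := by omega
    rw [PySem.List.pyRange_one_cons (by push_cast; omega)]
    by_cases hne : cn = e.toNat
    · have : PySem.List.pyRange ((cn : Int) + 1) ((e.toNat : Int) + 1) 1 = [] :=
        PySem.List.pyRange_one_eq_nil (by omega)
      simp [hse, hne, this, interleave, emitFold_cons, emitFold_nil, alphaLoopA]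
    · rw [PySem.List.pyRange_one_cons (by push_cast; omega)]
      have ih' := ih (cn + 1) e (ti + 1 + 1)
        (((d.insert ti ("SYMBOL", String.mk [Char.ofNat cn])).insert (ti+1) ("UNION", "|"))) (by omega)
      rw [PySem.List.pyRange_one_cons (by push_cast; omega)] at ih'
      simp only [hse, hne, if_true, if_false, ne_eq, not_false_eq_true, ite_true, List.map,
        Int.toNat_natCast]
      rw [interleave, emitFold_cons, emitFold_cons]
      have hc : ((cn : Int) + 1) = ((cn + 1 : Nat) : Int) := by push_cast; ring
      rw [hc]
      simpa using ih'

-- B's entry construction builds exactly [PAR(] ++ interleave symbols ++ [PAR)]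
theorem foldl_entries (l : List String) (init : List (String × String)) :
    l.foldl (fun acc s => acc ++ [("SYMBOL", s), ("UNION", "|")]) init
      = init ++ l.flatMap (fun s => [("SYMBOL", s), ("UNION", "|")]) := by
  induction l generalizing init with
  | nil => simp
  | cons s r ih => simp [ih, List.flatMap_cons]

theorem flatMap_dropLast (l : List String) (h : l ≠ []) :
    (l.flatMap (fun s => [("SYMBOL", s), ("UNION", "|")])).dropLast = interleave l := by
  induction l with
  | nil => simp at h
  | cons s r ih =>
    cases r with
    | nil => simp [interleave]
    | cons t r' =>
      have hne : (t :: r').flatMap (fun s => [(("SYMBOL" : String), s), ("UNION", "|")]) ≠ [] := by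
        simp [List.flatMap_cons]
      rw [interleave, List.flatMap_cons, List.dropLast_append_of_ne_nil hne, ih (by simp)]
      rfl

theorem entries_eq (symbols : List String) :
    ((if symbols = []
        then symbols.foldl (fun acc s => acc ++ [("SYMBOL", s), ("UNION", "|")]) [("PARANTEZA(", "(")]
        else (symbols.foldl (fun acc s => acc ++ [("SYMBOL", s), ("UNION", "|")]) [("PARANTEZA(", "(")]).dropLast)
      ++ [("PARANTEZA)", ")")])
    = ("PARANTEZA(", "(") :: interleave symbols ++ [("PARANTEZA)", ")")] := by
  by_cases h : symbols = []
  · subst h; simp [interleave]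
  · rw [if_neg h, foldl_entries, List.dropLast_append_of_ne_nil]
    · rw [flatMap_dropLast _ h]; simp
    · cases symbols with
      | nil => simp at h
      | cons a b => simp [List.flatMap_cons]

-- ===== VERDICT (by name: the statement is the Claim_ definition above) =====
theorem syntactic_sugar_spec : Claim_equal_syntactic_sugar := by
  intro index tokenIndex tokens regex _ hpre
  unfold Spec_syntactic_sugar syntactic_sugar syntactic_sugar_alt
  obtain ⟨h1, h3⟩ := hpre
  obtain ⟨start, hs⟩ : ∃ c, PySem.Str.pyGet? regex (index + 1) = some c := by
    cases hg : PySem.Str.pyGet? regex (index + 1) with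
    | none =>
      exact absurd h1 ((PySem.List.pyGet?_eq_none_iff (xs := regex.toList) (i := index + 1)).mp (by simpa using hg))
    | some c => exact ⟨c, rfl⟩
  obtain ⟨stop, ht⟩ : ∃ c, PySem.Str.pyGet? regex (index + 3) = some c := by
    cases hg : PySem.Str.pyGet? regex (index + 3) with
    | none =>
      exact absurd h3 ((PySem.List.pyGet?_eq_none_iff (xs := regex.toList) (i := index + 3)).mp (by simpa using hg))
    | some c => exact ⟨c, rfl⟩
  rw [hs, ht]
  by_cases hdig : (PySem.Chars.isdigit start && PySem.Chars.isdigit stop) = true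
  · -- digit branch; the alpha tests are then false
    have hnal : (PySem.Chars.isalpha start && PySem.Chars.isalpha stop) = false := by
      have hd1 : PySem.Chars.isdigit start = true := by
        cases hh : PySem.Chars.isdigit start <;> simp [hh] at hdig ⊢
      have h9 : start ≤ '9' := by
        simp [PySem.Chars.isdigit] at hd1; exact hd1.2
      have hU : PySem.Chars.isupper start = false := by
        simp [PySem.Chars.isupper]
        intro hA
        exact absurd (le_trans hA h9) (by decide)
      have hL : PySem.Chars.islower start = false := by
        simp [PySem.Chars.islower]
        intro ha
        exact absurd (le_trans ha h9) (by decide)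
      simp [PySem.Chars.isalpha, hU, hL]
    cases hcs : PySem.Int.ofChars? [start] with
    | none => simp [hdig, hnal, hcs, List.foldl]
    | some s =>
      cases hce : PySem.Int.ofChars? [stop] with
      | none => simp [hdig, hnal, hcs, hce, List.foldl]
      | some e =>
        have hD : ∀ ti d, digitLoopA s e ti d
            = emitFold (interleave ((PySem.List.pyRange s (e + 1) 1).map PySem.Int.toStr)) ti d :=
          fun ti d => digitLoopA_eq (e + 1 - s).toNat s e ti d rfl
        simp only [hdig, hnal, hcs, hce, Bool.false_eq_true, reduceIte]
        rw [entries_eq, hD]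
        simp only [emitFold, List.foldl_cons, List.foldl_append, List.foldl_nil]
  · have hdig' : (PySem.Chars.isdigit start && PySem.Chars.isdigit stop) = false := by
      cases hh : (PySem.Chars.isdigit start && PySem.Chars.isdigit stop) <;> simp_all
    by_cases hal : (PySem.Chars.isalpha start && PySem.Chars.isalpha stop) = true
    · have hA : ∀ ti d, alphaLoopA start.toNat stop ti d
          = emitFold (interleave ((PySem.List.pyRange (start.toNat : Int) ((stop.toNat : Int) + 1) 1).map
              (fun c => String.mk [Char.ofNat c.toNat]))) ti d :=
        fun ti d => alphaLoopA_eq (stop.toNat + 1 - start.toNat) start.toNat stop ti d rfl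
      simp only [hdig', hal, Bool.false_eq_true, reduceIte]
      rw [entries_eq, hA]
      simp only [emitFold, List.foldl_cons, List.foldl_append, List.foldl_nil]
    · have hal' : (PySem.Chars.isalpha start && PySem.Chars.isalpha stop) = false := by
        cases hh : (PySem.Chars.isalpha start && PySem.Chars.isalpha stop) <;> simp_all
      simp [hdig', hal', List.foldl]
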